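-- pv_equiv track=rewrite | github.com/jeanmonet/ebs_project_2023 | pubsub_datagen.py | combine_sub_worker_results
-- ===== SOURCE A (Python) =====
-- from collections import Counter
-- from collections import defaultdict
--
-- def count_sub_results(res):
--     counter = Counter()
--     op_counter = defaultdict(Counter)
--     for line in res:
--         for field, op, val in line:
--             counter[field] += 1
--             op_counter[field][op] += 1
--     op_counter = dict(op_counter)
--     return counter, op_counter
--
-- def combine_sub_worker_results(results):
--     counter = Counter()
--     op_counter = defaultdict(Counter)
--     for res in results:
--         _counter, _op_counter = count_sub_results(res)
--         counter.update(_counter)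
--         for key, op_counts in _op_counter.items():
--             op_counter[key].update(op_counts)
--     return counter, op_counter
-- ===== SOURCE B (Python) =====
-- from collections import Counter
-- from collections import defaultdict
--
--
-- def combine_sub_worker_results(results):
--     counter = Counter()
--     op_counter = defaultdict(Counter)
--     for res in results:
--         for line in res:
--             for field, op, val in line:
--                 counter[field] += 1
--                 op_counter[field][op] += 1
--     return counter, op_counter
-- ===== Notes on version B (the rewrite author's own statement) =====
-- stated objective: simpler
-- what changed: Replaces the per-result helper (build two intermediate counters per result, then merge them into the accumulators with Counter.update passes) with one flat triple loop that increments the two accumulators directly, eliminating the intermediate counters and the merge pass.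
import Mathlib
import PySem

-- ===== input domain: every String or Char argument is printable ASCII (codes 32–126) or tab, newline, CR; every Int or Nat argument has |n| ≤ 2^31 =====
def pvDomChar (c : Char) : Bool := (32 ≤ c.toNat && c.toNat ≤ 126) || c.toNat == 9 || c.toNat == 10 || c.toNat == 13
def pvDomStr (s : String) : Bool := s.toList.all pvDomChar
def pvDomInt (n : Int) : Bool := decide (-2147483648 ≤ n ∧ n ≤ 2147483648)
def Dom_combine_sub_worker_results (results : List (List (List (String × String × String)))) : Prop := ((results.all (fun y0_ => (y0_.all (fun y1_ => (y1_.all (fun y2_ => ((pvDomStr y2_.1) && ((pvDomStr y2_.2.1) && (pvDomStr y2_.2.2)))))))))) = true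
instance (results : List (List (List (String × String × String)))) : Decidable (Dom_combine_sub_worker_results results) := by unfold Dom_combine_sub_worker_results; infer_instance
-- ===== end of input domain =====

-- B replaces A's per-result helper (two intermediate counters per result, then a Counter.update merge pass)
-- with one flat triple loop that increments the two accumulators directly (objective: simpler).

-- ===== PORT A =====
-- Counter.update(self, other) for a Counter other: for (k, v) in other.items(): self[k] = self.get(k, 0) + v
def pvCounterUpdate (c d : PySem.Dict String Int) : PySem.Dict String Int :=
  d.items.foldl (fun c p => c.insert p.1 (c.getD p.1 0 + p.2)) c

def count_sub_results (res : List (List (String × String × String))) :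
    PySem.Dict String Int × PySem.Dict String (PySem.Dict String Int) :=
  res.foldl (fun st line =>
    line.foldl (fun st t =>
      (st.1.modify t.1 0 (· + 1),
       st.2.modify t.1 PySem.Dict.empty (fun inner => inner.modify t.2.1 0 (· + 1)))) st)
    (PySem.Dict.empty, PySem.Dict.empty)

def combine_sub_worker_results (results : List (List (List (String × String × String)))) :
    (List (String × Int)) × (List (String × List (String × Int))) :=
  let st := results.foldl (fun st res =>
    let r := count_sub_results res
    (pvCounterUpdate st.1 r.1,
     r.2.items.foldl (fun oc p => oc.modify p.1 PySem.Dict.empty (fun d => pvCounterUpdate d p.2)) st.2))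
    (PySem.Dict.empty, PySem.Dict.empty)
  (st.1.items, st.2.items.map (fun p => (p.1, p.2.items)))

-- ===== PORT B =====
def combine_sub_worker_results_alt (results : List (List (List (String × String × String)))) :
    (List (String × Int)) × (List (String × List (String × Int))) :=
  let st := results.foldl (fun st res =>
    res.foldl (fun st line =>
      line.foldl (fun st t =>
        (st.1.modify t.1 0 (· + 1),
         st.2.modify t.1 PySem.Dict.empty (fun d => d.modify t.2.1 0 (· + 1)))) st) st)
    (PySem.Dict.empty, PySem.Dict.empty)
  (st.1.items, st.2.items.map (fun p => (p.1, p.2.items)))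

-- ===== PRECONDITION & SPEC =====
def Spec_combine_sub_worker_results (results : List (List (List (String × String × String)))) (out : (List (String × Int)) × (List (String × List (String × Int)))) : Prop := out = combine_sub_worker_results_alt results
instance (results : List (List (List (String × String × String)))) (out : (List (String × Int)) × (List (String × List (String × Int)))) : Decidable (Spec_combine_sub_worker_results results out) := by unfold Spec_combine_sub_worker_results; infer_instance

-- ===== CLAIM (what is proved, stated in full; the proofs are below) =====
def Claim_equal_combine_sub_worker_results : Prop := ∀ (results : List (List (List (String × String × String)))), Dom_combine_sub_worker_results results → Spec_combine_sub_worker_results results (combine_sub_worker_results results)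

-- ===== LEMMAS AND PROOFS =====

-- A nested fold over a pair state whose components evolve independently is a pair of folds over the flattened list.
theorem pv_foldl_pair_flatten {α σ₁ σ₂ : Type} (f : σ₁ → α → σ₁) (g : σ₂ → α → σ₂) :
    ∀ (res : List (List α)) (c : σ₁) (oc : σ₂),
      res.foldl (fun st line => line.foldl (fun st t => (f st.1 t, g st.2 t)) st) (c, oc)
        = (res.flatten.foldl f c, res.flatten.foldl g oc) := by
  intro res
  induction res with
  | nil => intro c oc; rfl
  | cons line rest ih =>
      intro c oc
      simp only [List.foldl_cons, List.flatten_cons, List.foldl_append]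
      rw [PySem.List.foldl_prod_mk, ih]

theorem pv_set_add_of_mem {x : String} {s : List String} (h : x ∈ s) :
    PySem.Set.add s x = s := by
  simp [PySem.Set.add, PySem.Set.contains, h]

theorem pv_set_add_of_not_mem {x : String} {s : List String} (h : x ∉ s) :
    PySem.Set.add s x = s ++ [x] := by
  simp [PySem.Set.add, PySem.Set.contains, h]

theorem pv_set_update_ofList (s l : List String) :
    PySem.Set.update s (PySem.Set.ofList l) = PySem.Set.update s l := by
  induction l using List.reverseRecOn with
  | nil => rfl
  | append_singleton l x ih =>
      have hof : PySem.Set.ofList (l ++ [x]) = PySem.Set.add (PySem.Set.ofList l) x := by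
        simp [PySem.Set.ofList_eq_foldl]
      have hupd : ∀ (t : List String), PySem.Set.update s (t ++ [x]) = PySem.Set.add (PySem.Set.update s t) x := by
        intro t; simp [PySem.Set.update]
      by_cases hx : x ∈ l
      · rw [hof, pv_set_add_of_mem ((PySem.Set.mem_ofList l x).mpr hx), ih, hupd]
        rw [pv_set_add_of_mem ((PySem.Set.mem_update s l x).mpr (Or.inr hx))]
      · rw [hof, pv_set_add_of_not_mem (fun h => hx ((PySem.Set.mem_ofList l x).mp h)), hupd, ih, hupd]

theorem pv_dict_eq_of {ν : Type} (d d' : PySem.Dict String ν) (dflt : ν)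
    (hd : d.keys.Nodup) (hd' : d'.keys.Nodup) (hk : d.keys = d'.keys)
    (hg : ∀ j, d.getD j dflt = d'.getD j dflt) : d = d' := by
  apply PySem.Dict.ext
  rw [PySem.Dict.items_eq_map_keys d hd dflt, PySem.Dict.items_eq_map_keys d' hd' dflt, hk]
  simp only [hg]

-- the filter of a nodup list at one key
theorem pv_nodup_filter_beq : ∀ (s : List String), s.Nodup → ∀ (j : String),
    s.filter (fun k => k == j) = if j ∈ s then [j] else [] := by
  intro s
  induction s with
  | nil => intro _ j; simp
  | cons a tl ih =>
      intro h j
      have hna : a ∉ tl := (List.nodup_cons.mp h).1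
      have htl := (List.nodup_cons.mp h).2
      by_cases haj : a = j
      · subst haj
        simp [ih htl a, hna]
      · have : (a == j) = false := by simp [haj]
        simp only [List.filter_cons, this]
        rw [ih htl j]
        simp [List.mem_cons, Ne.symm haj]

-- getD of the Counter.update fold (items with distinct keys)
theorem pv_updGetD : ∀ (ps : List (String × Int)) (c : PySem.Dict String Int) (j : String),
    (ps.map Prod.fst).Nodup →
    (ps.foldl (fun c p => c.insert p.1 (c.getD p.1 0 + p.2)) c).getD j 0
      = c.getD j 0 + ((ps.filter (fun p => p.1 == j)).map Prod.snd).sum := by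
  intro ps
  induction ps with
  | nil => intro c j _; simp
  | cons p tl ih =>
      intro c j h
      have hp : p.1 ∉ tl.map Prod.fst := (List.nodup_cons.mp h).1
      have htl : (tl.map Prod.fst).Nodup := (List.nodup_cons.mp h).2
      simp only [List.foldl_cons]
      rw [ih _ j htl]
      by_cases hj : j = p.1
      · subst hj
        rw [PySem.Dict.getD_insert_self]
        have hfil : tl.filter (fun q => q.1 == p.1) = [] := by
          apply List.filter_eq_nil_iff.mpr
          intro q hq
          simp only [beq_iff_eq]
          intro hq1
          exact hp (hq1 ▸ List.mem_map_of_mem hq)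
        simp [hfil]
      · rw [PySem.Dict.getD_insert_of_ne _ _ _ hj]
        have : (p.1 == j) = false := by simp [Ne.symm hj]
        simp [this]

-- Counter.update of a freshly built counter is the direct increment loop.
theorem pv_counterUpdate_eq (xs : List String) (c : PySem.Dict String Int) (hc : c.keys.Nodup) :
    pvCounterUpdate c (PySem.Dict.counter xs) = xs.foldl (fun d x => d.modify x 0 (· + 1)) c := by
  have hmapfst : (PySem.Dict.counter xs).items.map Prod.fst = PySem.Set.ofList xs := by
    rw [show (PySem.Dict.counter xs).items.map Prod.fst = (PySem.Dict.counter xs).keys from rfl,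
        PySem.Dict.keys_counter]
  have hndL : (pvCounterUpdate c (PySem.Dict.counter xs)).keys.Nodup :=
    PySem.Dict.nodup_keys_foldl_insert_key _ Prod.fst (fun d p => d.getD p.1 0 + p.2) c hc
  have hndR : (xs.foldl (fun d x => d.modify x 0 (· + 1)) c).keys.Nodup :=
    PySem.Dict.nodup_keys_foldl_modify_key xs (fun x => x) 0 (fun _ _ => (· + 1)) c hc
  have hkL : (pvCounterUpdate c (PySem.Dict.counter xs)).keys
      = PySem.Set.update c.keys ((PySem.Dict.counter xs).items.map Prod.fst) :=
    PySem.Dict.keys_foldl_insert_key _ Prod.fst (fun d p => d.getD p.1 0 + p.2) c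
  have hkR : (xs.foldl (fun d x => d.modify x 0 (· + 1)) c).keys
      = PySem.Set.update c.keys (xs.map (fun x => x)) :=
    PySem.Dict.keys_foldl_modify_key xs (fun x => x) 0 (fun _ _ => (· + 1)) c
  apply pv_dict_eq_of _ _ 0 hndL hndR
  · rw [hkL, hkR, hmapfst, pv_set_update_ofList]
    simp
  · intro j
    have hnd : ((PySem.Dict.counter xs).items.map Prod.fst).Nodup := by
      rw [hmapfst]; exact PySem.Set.nodup_ofList xs
    rw [show pvCounterUpdate c (PySem.Dict.counter xs)
          = (PySem.Dict.counter xs).items.foldl (fun c p => c.insert p.1 (c.getD p.1 0 + p.2)) c from rfl]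
    rw [pv_updGetD _ c j hnd, PySem.Dict.getD_foldl_modify_add_one xs c j, PySem.Dict.items_counter]
    rw [List.filter_map, List.map_map]
    have hcomp : ((fun p : String × Int => p.1 == j) ∘ fun k => ((k : String), (xs.count k : Int)))
        = fun k => k == j := rfl
    rw [hcomp, pv_nodup_filter_beq _ (PySem.Set.nodup_ofList xs) j]
    by_cases hj : j ∈ xs
    · simp [(PySem.Set.mem_ofList xs j).mpr hj]
    · have hnj : j ∉ PySem.Set.ofList xs := fun h => hj ((PySem.Set.mem_ofList xs j).mp h)
      simp [hnj, List.count_eq_zero_of_not_mem hj]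

-- getD through a fold of keyed modifies: only the matching elements act, in order.
theorem pv_gmod {ν α : Type} (key : α → String) (F : α → ν → ν) (f0 : ν) :
    ∀ (l : List α) (oc : PySem.Dict String ν) (j : String),
    (l.foldl (fun oc t => oc.modify (key t) f0 (F t)) oc).getD j f0
      = (l.filter (fun t => key t == j)).foldl (fun d t => F t d) (oc.getD j f0) := by
  intro l
  induction l with
  | nil => intro oc j; rfl
  | cons t tl ih =>
      intro oc j
      simp only [List.foldl_cons, List.filter_cons]
      by_cases h : key t = j
      · have hb : (key t == j) = true := by simp [h]
        rw [ih]
        simp only [hb, if_pos, List.foldl_cons]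
        subst h
        rw [PySem.Dict.getD_modify_self]
      · have hb : (key t == j) = false := by simp [h]
        rw [ih, PySem.Dict.getD_modify_of_ne _ _ _ (Ne.symm h)]
        simp [hb]

theorem pv_update_nil (l : List String) : PySem.Set.update [] l = PySem.Set.ofList l := by
  simp [PySem.Set.update, PySem.Set.ofList_eq_foldl]

-- merging the per-result op-counter into the accumulator is the direct nested increment loop
theorem pv_opmerge (L : List (String × String × String)) (oc : PySem.Dict String (PySem.Dict String Int))
    (hoc : oc.keys.Nodup) (hin : ∀ f, (oc.getD f PySem.Dict.empty).keys.Nodup) :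
    (L.foldl (fun oc t => oc.modify t.1 (PySem.Dict.empty : PySem.Dict String Int) (fun d => d.modify t.2.1 0 (· + 1)))
        PySem.Dict.empty).items.foldl
        (fun oc p => oc.modify p.1 PySem.Dict.empty (fun d => pvCounterUpdate d p.2)) oc
      = L.foldl (fun oc t => oc.modify t.1 (PySem.Dict.empty : PySem.Dict String Int) (fun d => d.modify t.2.1 0 (· + 1))) oc := by
  have hOk : (L.foldl (fun oc t => oc.modify t.1 (PySem.Dict.empty : PySem.Dict String Int) (fun d => d.modify t.2.1 0 (· + 1)))
        PySem.Dict.empty).keys = PySem.Set.ofList (L.map (fun t => t.1)) := by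
    have h : (L.foldl (fun oc t => oc.modify t.1 (PySem.Dict.empty : PySem.Dict String Int) (fun d => d.modify t.2.1 0 (· + 1)))
          PySem.Dict.empty).keys
        = PySem.Set.update (PySem.Dict.empty : PySem.Dict String (PySem.Dict String Int)).keys
            (L.map (fun t => t.1)) :=
      PySem.Dict.keys_foldl_modify_key L (fun t => t.1) PySem.Dict.empty
        (fun _ t => fun d => d.modify t.2.1 0 (· + 1)) PySem.Dict.empty
    rw [h, PySem.Dict.keys_empty, pv_update_nil]
  have hOnd : (L.foldl (fun oc t => oc.modify t.1 (PySem.Dict.empty : PySem.Dict String Int) (fun d => d.modify t.2.1 0 (· + 1)))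
        PySem.Dict.empty).keys.Nodup :=
    PySem.Dict.nodup_keys_foldl_modify_key L (fun t => t.1) PySem.Dict.empty
      (fun _ t => fun d => d.modify t.2.1 0 (· + 1)) PySem.Dict.empty PySem.Dict.nodup_keys_empty
  have hOg : ∀ j, (L.foldl (fun oc t => oc.modify t.1 (PySem.Dict.empty : PySem.Dict String Int) (fun d => d.modify t.2.1 0 (· + 1)))
        PySem.Dict.empty).getD j PySem.Dict.empty
      = PySem.Dict.counter ((L.filter (fun t => t.1 == j)).map (fun t => t.2.1)) := by
    intro j
    have h : (L.foldl (fun oc t => oc.modify t.1 (PySem.Dict.empty : PySem.Dict String Int) (fun d => d.modify t.2.1 0 (· + 1)))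
          PySem.Dict.empty).getD j PySem.Dict.empty
        = (L.filter (fun t => t.1 == j)).foldl (fun d t => d.modify t.2.1 0 (· + 1))
            ((PySem.Dict.empty : PySem.Dict String (PySem.Dict String Int)).getD j PySem.Dict.empty) :=
      pv_gmod (fun t : String × String × String => t.1) (fun t => fun d : PySem.Dict String Int => d.modify t.2.1 0 (· + 1)) (PySem.Dict.empty : PySem.Dict String Int) L
        PySem.Dict.empty j
    rw [h, PySem.Dict.getD_empty, PySem.Dict.counter_eq_foldl]
    exact (List.foldl_map (f := fun t : String × String × String => t.2.1)
      (g := fun d : PySem.Dict String Int => fun x => d.modify x 0 (· + 1))).symm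
  have hRg : ∀ j, (L.foldl (fun oc t => oc.modify t.1 (PySem.Dict.empty : PySem.Dict String Int) (fun d => d.modify t.2.1 0 (· + 1))) oc).getD
        j PySem.Dict.empty
      = ((L.filter (fun t => t.1 == j)).map (fun t => t.2.1)).foldl
          (fun d x => d.modify x 0 (· + 1)) (oc.getD j PySem.Dict.empty) := by
    intro j
    have h : (L.foldl (fun oc t => oc.modify t.1 (PySem.Dict.empty : PySem.Dict String Int) (fun d => d.modify t.2.1 0 (· + 1))) oc).getD
          j PySem.Dict.empty
        = (L.filter (fun t => t.1 == j)).foldl (fun d t => d.modify t.2.1 0 (· + 1))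
            (oc.getD j PySem.Dict.empty) :=
      pv_gmod (fun t : String × String × String => t.1) (fun t => fun d : PySem.Dict String Int => d.modify t.2.1 0 (· + 1)) (PySem.Dict.empty : PySem.Dict String Int) L oc j
    rw [h]
    exact (List.foldl_map (f := fun t : String × String × String => t.2.1)
      (g := fun d : PySem.Dict String Int => fun x => d.modify x 0 (· + 1))).symm
  apply pv_dict_eq_of _ _ PySem.Dict.empty
  · exact PySem.Dict.nodup_keys_foldl_modify_key _ Prod.fst PySem.Dict.empty
      (fun _ p => fun d => pvCounterUpdate d p.2) oc hoc
  · exact PySem.Dict.nodup_keys_foldl_modify_key L (fun t => t.1) PySem.Dict.empty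
      (fun _ t => fun d => d.modify t.2.1 0 (· + 1)) oc hoc
  · have h1 : ((L.foldl (fun oc t => oc.modify t.1 (PySem.Dict.empty : PySem.Dict String Int) (fun d => d.modify t.2.1 0 (· + 1)))
          PySem.Dict.empty).items.foldl
          (fun oc p => oc.modify p.1 PySem.Dict.empty (fun d => pvCounterUpdate d p.2)) oc).keys
        = PySem.Set.update oc.keys
            ((L.foldl (fun oc t => oc.modify t.1 (PySem.Dict.empty : PySem.Dict String Int) (fun d => d.modify t.2.1 0 (· + 1)))
              PySem.Dict.empty).items.map Prod.fst) :=
      PySem.Dict.keys_foldl_modify_key _ Prod.fst PySem.Dict.empty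
        (fun _ p => fun d => pvCounterUpdate d p.2) oc
    have h2 : (L.foldl (fun oc t => oc.modify t.1 (PySem.Dict.empty : PySem.Dict String Int) (fun d => d.modify t.2.1 0 (· + 1))) oc).keys
        = PySem.Set.update oc.keys (L.map (fun t => t.1)) :=
      PySem.Dict.keys_foldl_modify_key L (fun t => t.1) PySem.Dict.empty
        (fun _ t => fun d => d.modify t.2.1 0 (· + 1)) oc
    rw [h1, h2,
      show (L.foldl (fun oc t => oc.modify t.1 (PySem.Dict.empty : PySem.Dict String Int) (fun d => d.modify t.2.1 0 (· + 1)))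
          PySem.Dict.empty).items.map Prod.fst
        = (L.foldl (fun oc t => oc.modify t.1 (PySem.Dict.empty : PySem.Dict String Int) (fun d => d.modify t.2.1 0 (· + 1)))
            PySem.Dict.empty).keys from rfl,
      hOk, pv_set_update_ofList]
  · intro j
    have h1 : ((L.foldl (fun oc t => oc.modify t.1 (PySem.Dict.empty : PySem.Dict String Int) (fun d => d.modify t.2.1 0 (· + 1)))
          PySem.Dict.empty).items.foldl
          (fun oc p => oc.modify p.1 PySem.Dict.empty (fun d => pvCounterUpdate d p.2)) oc).getD
          j PySem.Dict.empty
        = ((L.foldl (fun oc t => oc.modify t.1 (PySem.Dict.empty : PySem.Dict String Int) (fun d => d.modify t.2.1 0 (· + 1)))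
            PySem.Dict.empty).items.filter (fun p => p.1 == j)).foldl
            (fun d p => pvCounterUpdate d p.2) (oc.getD j PySem.Dict.empty) :=
      pv_gmod Prod.fst (fun p : String × PySem.Dict String Int => fun d => pvCounterUpdate d p.2) (PySem.Dict.empty : PySem.Dict String Int) _ oc j
    rw [h1, hRg j, PySem.Dict.items_eq_map_keys _ hOnd (PySem.Dict.empty : PySem.Dict String Int), List.filter_map]
    have hcomp : ((fun p : String × PySem.Dict String Int => p.1 == j)
        ∘ fun k => (k, (L.foldl (fun oc t => oc.modify t.1 (PySem.Dict.empty : PySem.Dict String Int) (fun d => d.modify t.2.1 0 (· + 1)))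
            PySem.Dict.empty).getD k PySem.Dict.empty)) = fun k => k == j := rfl
    rw [hcomp, pv_nodup_filter_beq _ hOnd j]
    by_cases hj : j ∈ (L.foldl (fun oc t => oc.modify t.1 (PySem.Dict.empty : PySem.Dict String Int) (fun d => d.modify t.2.1 0 (· + 1)))
        PySem.Dict.empty).keys
    · rw [if_pos hj]
      simp only [List.map_cons, List.map_nil, List.foldl_cons, List.foldl_nil]
      rw [hOg j, pv_counterUpdate_eq _ _ (hin j)]
    · rw [if_neg hj]
      simp only [List.map_nil, List.foldl_nil]
      have hLf : L.filter (fun t => t.1 == j) = [] := by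
        apply List.filter_eq_nil_iff.mpr
        intro t ht
        simp only [beq_iff_eq]
        intro h1
        apply hj
        rw [hOk, PySem.Set.mem_ofList]
        exact h1 ▸ List.mem_map_of_mem ht
      rw [hLf]
      rfl

-- one result: A's aggregate-then-merge step equals B's direct nested increment step
theorem pv_step_eq (res : List (List (String × String × String)))
    (c : PySem.Dict String Int) (oc : PySem.Dict String (PySem.Dict String Int))
    (hc : c.keys.Nodup) (hoc : oc.keys.Nodup)
    (hin : ∀ f, (oc.getD f PySem.Dict.empty).keys.Nodup) :
    (pvCounterUpdate c (count_sub_results res).1,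
     (count_sub_results res).2.items.foldl
       (fun oc p => oc.modify p.1 PySem.Dict.empty (fun d => pvCounterUpdate d p.2)) oc)
    = res.foldl (fun st line =>
        line.foldl (fun st t =>
          (st.1.modify t.1 0 (· + 1),
           st.2.modify t.1 PySem.Dict.empty (fun d => d.modify t.2.1 0 (· + 1)))) st) (c, oc) := by
  have hcount : count_sub_results res
      = (res.flatten.foldl (fun c t => c.modify t.1 0 (· + 1)) PySem.Dict.empty,
         res.flatten.foldl (fun oc t => oc.modify t.1 (PySem.Dict.empty : PySem.Dict String Int) (fun d => d.modify t.2.1 0 (· + 1)))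
           PySem.Dict.empty) :=
    pv_foldl_pair_flatten (fun (c : PySem.Dict String Int) (t : String × String × String) => c.modify t.1 0 (· + 1))
      (fun (oc : PySem.Dict String (PySem.Dict String Int)) t => oc.modify t.1 PySem.Dict.empty (fun d => d.modify t.2.1 0 (· + 1)))
      res PySem.Dict.empty PySem.Dict.empty
  have hB : res.foldl (fun st line =>
        line.foldl (fun st t =>
          (st.1.modify t.1 0 (· + 1),
           st.2.modify t.1 PySem.Dict.empty (fun d => d.modify t.2.1 0 (· + 1)))) st) (c, oc)
      = (res.flatten.foldl (fun c t => c.modify t.1 0 (· + 1)) c,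
         res.flatten.foldl (fun oc t => oc.modify t.1 (PySem.Dict.empty : PySem.Dict String Int) (fun d => d.modify t.2.1 0 (· + 1))) oc) :=
    pv_foldl_pair_flatten (fun (c : PySem.Dict String Int) (t : String × String × String) => c.modify t.1 0 (· + 1))
      (fun (oc : PySem.Dict String (PySem.Dict String Int)) t => oc.modify t.1 PySem.Dict.empty (fun d => d.modify t.2.1 0 (· + 1)))
      res c oc
  rw [hcount, hB]
  have hmap : ∀ (x : PySem.Dict String Int), res.flatten.foldl (fun c t => c.modify t.1 0 (· + 1)) x
      = (res.flatten.map (fun t => t.1)).foldl (fun d k => d.modify k 0 (· + 1)) x :=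
    fun x => (List.foldl_map (f := fun t : String × String × String => t.1)
      (g := fun d : PySem.Dict String Int => fun k => d.modify k 0 (· + 1))).symm
  refine Prod.ext ?_ ?_
  · show pvCounterUpdate c (res.flatten.foldl (fun c t => c.modify t.1 0 (· + 1)) PySem.Dict.empty)
        = res.flatten.foldl (fun c t => c.modify t.1 0 (· + 1)) c
    rw [hmap PySem.Dict.empty, hmap c, ← PySem.Dict.counter_eq_foldl]
    exact pv_counterUpdate_eq _ c hc
  · exact pv_opmerge res.flatten oc hoc hin

-- B's step preserves the key-uniqueness invariants
theorem pv_step_inv (res : List (List (String × String × String)))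
    (c : PySem.Dict String Int) (oc : PySem.Dict String (PySem.Dict String Int))
    (hc : c.keys.Nodup) (hoc : oc.keys.Nodup)
    (hin : ∀ f, (oc.getD f PySem.Dict.empty).keys.Nodup) :
    (res.flatten.foldl (fun c t => c.modify t.1 0 (· + 1)) c).keys.Nodup ∧
      (res.flatten.foldl (fun oc t => oc.modify t.1 (PySem.Dict.empty : PySem.Dict String Int) (fun d => d.modify t.2.1 0 (· + 1))) oc).keys.Nodup ∧
      ∀ f, ((res.flatten.foldl (fun oc t => oc.modify t.1 (PySem.Dict.empty : PySem.Dict String Int) (fun d => d.modify t.2.1 0 (· + 1))) oc).getD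
          f PySem.Dict.empty).keys.Nodup := by
  refine ⟨?_, ?_, ?_⟩
  · exact PySem.Dict.nodup_keys_foldl_modify_key res.flatten (fun t => t.1) 0
      (fun _ _ => (· + 1)) c hc
  · exact PySem.Dict.nodup_keys_foldl_modify_key res.flatten (fun t => t.1) PySem.Dict.empty
      (fun _ t => fun d => d.modify t.2.1 0 (· + 1)) oc hoc
  · intro f
    have h : (res.flatten.foldl (fun oc t => oc.modify t.1 (PySem.Dict.empty : PySem.Dict String Int) (fun d => d.modify t.2.1 0 (· + 1))) oc).getD
          f PySem.Dict.empty
        = (res.flatten.filter (fun t => t.1 == f)).foldl (fun d t => d.modify t.2.1 0 (· + 1))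
            (oc.getD f PySem.Dict.empty) :=
      pv_gmod (fun t : String × String × String => t.1) (fun t => fun d : PySem.Dict String Int => d.modify t.2.1 0 (· + 1)) (PySem.Dict.empty : PySem.Dict String Int)
        res.flatten oc f
    rw [h]
    exact PySem.Dict.nodup_keys_foldl_modify_key _ (fun t : String × String × String => t.2.1) 0
      (fun _ _ => (· + 1)) _ (hin f)

theorem pv_main : ∀ (results : List (List (List (String × String × String))))
    (st : PySem.Dict String Int × PySem.Dict String (PySem.Dict String Int)),
    st.1.keys.Nodup → st.2.keys.Nodup →
    (∀ f, (st.2.getD f PySem.Dict.empty).keys.Nodup) →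
    results.foldl (fun st res =>
      let r := count_sub_results res
      (pvCounterUpdate st.1 r.1,
       r.2.items.foldl (fun oc p => oc.modify p.1 PySem.Dict.empty (fun d => pvCounterUpdate d p.2)) st.2))
      st
    = results.foldl (fun st res =>
        res.foldl (fun st line =>
          line.foldl (fun st t =>
            (st.1.modify t.1 0 (· + 1),
             st.2.modify t.1 PySem.Dict.empty (fun d => d.modify t.2.1 0 (· + 1)))) st) st) st := by
  intro results
  induction results with
  | nil => intro st _ _ _; rfl
  | cons res rest ih =>
      rintro ⟨c, oc⟩ hc hoc hin
      simp only [List.foldl_cons]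
      rw [pv_step_eq res c oc hc hoc hin]
      obtain ⟨h1, h2, h3⟩ := pv_step_inv res c oc hc hoc hin
      have hst : res.foldl (fun st line =>
            line.foldl (fun st t =>
              (st.1.modify t.1 0 (· + 1),
               st.2.modify t.1 PySem.Dict.empty (fun d => d.modify t.2.1 0 (· + 1)))) st) (c, oc)
          = (res.flatten.foldl (fun c t => c.modify t.1 0 (· + 1)) c,
             res.flatten.foldl (fun oc t => oc.modify t.1 (PySem.Dict.empty : PySem.Dict String Int) (fun d => d.modify t.2.1 0 (· + 1))) oc) :=
        pv_foldl_pair_flatten (fun (c : PySem.Dict String Int) (t : String × String × String) => c.modify t.1 0 (· + 1))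
          (fun (oc : PySem.Dict String (PySem.Dict String Int)) t => oc.modify t.1 PySem.Dict.empty (fun d => d.modify t.2.1 0 (· + 1)))
          res c oc
      rw [hst]
      exact ih _ h1 h2 h3

-- ===== VERDICT (by name: the statement is the Claim_ definition above) =====
theorem combine_sub_worker_results_spec : Claim_equal_combine_sub_worker_results := by
  intro results _
  unfold Spec_combine_sub_worker_results combine_sub_worker_results combine_sub_worker_results_alt
  rw [pv_main results (PySem.Dict.empty, PySem.Dict.empty) PySem.Dict.nodup_keys_empty
    PySem.Dict.nodup_keys_empty
    (fun f => by rw [PySem.Dict.getD_empty]; exact PySem.Dict.nodup_keys_empty)]
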